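-- pv_equiv track=rewrite | github.com/InfinityLoop1/apftoolweb | apftool/af2tool.py | generate_runs_af2_l
-- ===== SOURCE A (Python) =====
-- def generate_runs_af2_l(bitmap: list, lineskip: int, w: int, h: int):
--     runcounter = 0
--     currentrun = False  # swapping this will invert the image as well
--     runlens = []
--     curline = h-1
--     revmap = []
--     passoffset = 0
--     for i in range(h):
--         revmap.append(bitmap[curline])
--         curline -= lineskip
--         if curline < 0:
--             curline = h-1
--             passoffset +=1
--             curline -= passoffset
--
--     for vline in revmap:
--         for pixel in vline:
--             if currentrun == pixel:
--                 if runcounter+1 > 94: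
--                     runlens.append(runcounter)
--                     runlens.append(0)
--                     runcounter = 0
--                 runcounter += 1
--             else:
--                 runlens.append(runcounter)
--                 runcounter = 1
--                 currentrun = pixel
--     if runcounter > 0:
--         runlens.append(runcounter)
--     return runlens
-- ===== SOURCE B (Python) =====
-- def generate_runs_af2_l(bitmap: list, lineskip: int, w: int, h: int):
--     # same line-reordering as the original
--     curline = h - 1
--     revmap = []
--     passoffset = 0
--     for i in range(h):
--         revmap.append(bitmap[curline])
--         curline -= lineskip
--         if curline < 0:
--             curline = h - 1
--             passoffset += 1
--             curline -= passoffset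
--
--     # pass 1: raw (uncapped) alternating run lengths over the pixel stream
--     pixels = [p for line in revmap for p in line]
--     current = False
--     count = 0
--     raw = []
--     for p in pixels:
--         if current == p:
--             count += 1
--         else:
--             raw.append(count)
--             current = p
--             count = 1
--     if count > 0:
--         raw.append(count)
--
--     # pass 2: expand each raw length under the 94 cap
--     out = []
--     for L in raw:
--         if L == 0:
--             out.append(0)
--         else:
--             k = (L - 1) // 94
--             out.extend([94, 0] * k)
--             out.append(L - 94 * k)
--     return out
-- ===== Notes on version B (the rewrite author's own statement) =====
-- stated objective: alternative
-- what changed: The single capped RLE loop (cap logic interleaved with counting) is replaced by two passes: first collect raw uncapped run lengths over the pixel stream, then expand each length arithmetically into 94-capped chunks with k=(L-1)//94; the line-reordering pass is kept unchanged.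
import Mathlib
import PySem

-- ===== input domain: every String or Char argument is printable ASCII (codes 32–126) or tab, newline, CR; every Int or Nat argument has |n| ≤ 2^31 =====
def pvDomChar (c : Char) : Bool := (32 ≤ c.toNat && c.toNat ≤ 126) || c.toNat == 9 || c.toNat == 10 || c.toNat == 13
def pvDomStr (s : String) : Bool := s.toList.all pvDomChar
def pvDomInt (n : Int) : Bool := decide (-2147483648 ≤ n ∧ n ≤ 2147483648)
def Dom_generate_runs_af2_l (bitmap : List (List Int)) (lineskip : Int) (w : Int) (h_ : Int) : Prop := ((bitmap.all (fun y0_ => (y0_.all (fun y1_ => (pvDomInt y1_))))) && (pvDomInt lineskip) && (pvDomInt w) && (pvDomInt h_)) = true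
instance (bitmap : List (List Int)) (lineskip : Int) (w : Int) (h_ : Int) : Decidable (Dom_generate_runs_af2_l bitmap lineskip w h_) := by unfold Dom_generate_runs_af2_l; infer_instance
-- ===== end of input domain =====

-- B keeps A's line-reordering pass but replaces the capped single-pass RLE by two passes:
-- raw (uncapped) run lengths first, then arithmetic expansion of each run under the 94 cap
-- (objective: alternative decomposition; no speed claim).

-- ===== PORT A =====
-- the line-reordering loop, identical character for character in A and in B (both ports use it);
-- bitmap[curline] is Python indexing (negative wrap, IndexError out of range): pyGetD is exact
-- under Pre_generate_runs_af2_l, which excludes exactly the raising inputs.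
def pvReorder (bitmap : List (List Int)) (lineskip : Int) (h_ : Int) : List (List Int) :=
  ((PySem.List.pyRange 0 h_ 1).foldl
    (fun (st : Int × Int × List (List Int)) _ =>
      let curline := st.1
      let passoffset := st.2.1
      let revmap := st.2.2 ++ [PySem.List.pyGetD bitmap curline []]
      let curline := curline - lineskip
      if curline < 0 then
        let passoffset := passoffset + 1
        (h_ - 1 - passoffset, passoffset, revmap)
      else (curline, passoffset, revmap))
    (h_ - 1, 0, [])).2.2

-- A's inner-loop body; state = (runcounter, currentrun, runlens).
-- Python's 'currentrun = False' then 'currentrun == pixel' on ints is 'pixel == 0', and after the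
-- first reassignment currentrun is an int: modelled exactly by an Int initialised to 0.
def pvStepA (st : Int × Int × List Int) (p : Int) : Int × Int × List Int :=
  let rc := st.1; let cur := st.2.1; let out := st.2.2
  if cur == p then
    if rc + 1 > 94 then (1, cur, out ++ [rc, 0])  -- runcounter := 0 then += 1
    else (rc + 1, cur, out)
  else (1, p, out ++ [rc])

def generate_runs_af2_l (bitmap : List (List Int)) (lineskip : Int) (w : Int) (h_ : Int) : List Int :=
  let revmap := pvReorder bitmap lineskip h_
  let st := revmap.foldl (fun s vline => vline.foldl pvStepA s) ((0 : Int), (0 : Int), ([] : List Int))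
  if st.1 > 0 then st.2.2 ++ [st.1] else st.2.2

-- ===== PORT B =====
-- pass 1 body: uncapped run lengths; state = (count, current, raw)
def pvRawStep (st : Int × Int × List Int) (p : Int) : Int × Int × List Int :=
  let cnt := st.1; let cur := st.2.1; let raw := st.2.2
  if cur == p then (cnt + 1, cur, raw) else (1, p, raw ++ [cnt])

-- pass 2 body: expand one raw length L under the 94 cap
def pvExpandStep (acc : List Int) (L : Int) : List Int :=
  if L == 0 then acc ++ [0]
  else
    let k := PySem.Int.floordiv (L - 1) 94
    acc ++ (List.replicate k.toNat ([94, 0] : List Int)).flatten ++ [L - 94 * k]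

def generate_runs_af2_l_alt (bitmap : List (List Int)) (lineskip : Int) (w : Int) (h_ : Int) : List Int :=
  let revmap := pvReorder bitmap lineskip h_
  let pixels := revmap.flatMap id
  let st := pixels.foldl pvRawStep ((0 : Int), (0 : Int), ([] : List Int))
  let raw := if st.1 > 0 then st.2.2 ++ [st.1] else st.2.2
  raw.foldl pvExpandStep []

-- ===== PRECONDITION & SPEC =====
-- Pre_ excludes exactly the inputs on which A raises IndexError at bitmap[curline]
-- (first access is index h_-1; a negative lineskip walks the index upward by -lineskip per line).
def Pre_generate_runs_af2_l (bitmap : List (List Int)) (lineskip : Int) (w : Int) (h_ : Int) : Prop :=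
  h_ ≤ 0 ∨ (0 ≤ lineskip ∧ h_ ≤ bitmap.length) ∨
    (lineskip < 0 ∧ (h_ - 1) + (h_ - 1) * (-lineskip) < bitmap.length)
instance (bitmap : List (List Int)) (lineskip : Int) (w : Int) (h_ : Int) : Decidable (Pre_generate_runs_af2_l bitmap lineskip w h_) := by unfold Pre_generate_runs_af2_l; infer_instance

def pvWitness_generate_runs_af2_l : List (List Int) × Int × Int × Int := ([[0, 1], [1, 1]], 1, 2, 2)

def Spec_generate_runs_af2_l (bitmap : List (List Int)) (lineskip : Int) (w : Int) (h_ : Int) (out : List Int) : Prop := out = generate_runs_af2_l_alt bitmap lineskip w h_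
instance (bitmap : List (List Int)) (lineskip : Int) (w : Int) (h_ : Int) (out : List Int) : Decidable (Spec_generate_runs_af2_l bitmap lineskip w h_ out) := by unfold Spec_generate_runs_af2_l; infer_instance

-- ===== CLAIM (what is proved, stated in full; the proofs are below) =====
def Claim_equal_generate_runs_af2_l : Prop := ∀ (bitmap : List (List Int)) (lineskip : Int) (w : Int) (h_ : Int), Dom_generate_runs_af2_l bitmap lineskip w h_ → Pre_generate_runs_af2_l bitmap lineskip w h_ → Spec_generate_runs_af2_l bitmap lineskip w h_ (generate_runs_af2_l bitmap lineskip w h_)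

-- ===== LEMMAS AND PROOFS =====

-- expansion of a single raw run length (the value pvExpandStep appends)
def pvExpandOne (L : Int) : List Int :=
  if L == 0 then [0]
  else
    let k := PySem.Int.floordiv (L - 1) 94
    (List.replicate k.toNat ([94, 0] : List Int)).flatten ++ [L - 94 * k]

lemma expand_foldl (raw : List Int) : ∀ acc : List Int,
    raw.foldl pvExpandStep acc = acc ++ raw.flatMap pvExpandOne := by
  induction raw with
  | nil => simp
  | cons L t ih =>
    intro acc
    simp only [List.foldl_cons, List.flatMap_cons, ih]
    simp only [pvExpandStep, pvExpandOne]
    by_cases h : L == 0 <;> simp [h]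

-- the invariant tying A's capped state to B's raw state
def pvInv (sA sB : Int × Int × List Int) : Prop :=
  sA.2.1 = sB.2.1 ∧
  ((sB.1 = 0 ∧ sA.1 = 0 ∧ sB.2.2 = [] ∧ sA.2.2 = []) ∨
   (1 ≤ sB.1 ∧
      sA.1 = sB.1 - 94 * PySem.Int.floordiv (sB.1 - 1) 94 ∧
      sA.2.2 = sB.2.2.flatMap pvExpandOne ++
        (List.replicate (PySem.Int.floordiv (sB.1 - 1) 94).toNat ([94, 0] : List Int)).flatten))

lemma floordiv94_bounds (a : Int) (_h : 0 ≤ a) :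
    94 * PySem.Int.floordiv a 94 ≤ a ∧ a < 94 * PySem.Int.floordiv a 94 + 94 := by
  rw [PySem.Int.floordiv_eq_ediv_of_pos (by omega)]
  constructor
  · have := Int.ediv_add_emod a 94
    have := Int.emod_nonneg a (by norm_num : (94:Int) ≠ 0)
    omega
  · have := Int.ediv_add_emod a 94
    have := Int.emod_lt_of_pos a (by norm_num : (0:Int) < 94)
    omega

lemma floordiv94_eq (a q : Int) (h1 : 94 * q ≤ a) (h2 : a < 94 * q + 94) :
    PySem.Int.floordiv a 94 = q := by
  rw [PySem.Int.floordiv_eq_iff_of_pos (by norm_num)]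
  omega

lemma replicate_flatten_succ (n : Nat) :
    (List.replicate (n + 1) ([94, 0] : List Int)).flatten
      = (List.replicate n ([94, 0] : List Int)).flatten ++ [94, 0] := by
  rw [List.replicate_succ']
  simp

lemma expandOne_pos (L : Int) (h : 1 ≤ L) :
    pvExpandOne L =
      (List.replicate (PySem.Int.floordiv (L - 1) 94).toNat ([94, 0] : List Int)).flatten
        ++ [L - 94 * PySem.Int.floordiv (L - 1) 94] := by
  have : ¬ (L == 0) = true := by simp; omega
  simp [pvExpandOne, this]

lemma pvInv_step (sA sB : Int × Int × List Int) (p : Int) (h : pvInv sA sB) :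
    pvInv (pvStepA sA p) (pvRawStep sB p) := by
  obtain ⟨rc, cur, out⟩ := sA
  obtain ⟨cnt, cur', raw⟩ := sB
  obtain ⟨hcur, hrest⟩ := h
  simp only at hcur
  have e0 : PySem.Int.floordiv 0 94 = 0 := floordiv94_eq 0 0 (by omega) (by omega)
  rcases hrest with ⟨h0, hrc, hraw, hout⟩ | ⟨h1, hrc, hout⟩
  · -- initial state: cnt = 0
    simp only at h0 hrc hraw hout
    subst hcur h0 hrc hraw hout
    by_cases hp : (cur == p) = true
    · simp [pvStepA, pvRawStep, pvInv, hp]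
    · simp [pvStepA, pvRawStep, pvInv, hp, pvExpandOne]
  · -- running state: cnt ≥ 1
    simp only at h1 hrc hout
    subst hcur
    set k := PySem.Int.floordiv (cnt - 1) 94 with hk
    obtain ⟨hb1, hb2⟩ := floordiv94_bounds (cnt - 1) (by omega)
    rw [← hk] at hb1 hb2
    by_cases hp : (cur == p) = true
    · by_cases hcap : rc + 1 > 94
      · -- cap flush: rc was 94, so cnt = 94*(k+1); new raw count is cnt+1, its k is k+1
        have hcnt : cnt = 94 * k + 94 := by omega
        have hk' : PySem.Int.floordiv (cnt + 1 - 1) 94 = k + 1 :=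
          floordiv94_eq _ _ (by omega) (by omega)
        have hkn : (k + 1).toNat = k.toNat + 1 := by omega
        simp only [pvStepA, pvRawStep, hp, if_pos, hcap]
        refine ⟨rfl, Or.inr ⟨by simp; omega, ?_, ?_⟩⟩
        · simp only [hk']
          omega
        · simp only [hk', hkn, replicate_flatten_succ]
          simp [hout, hrc, hcnt]
      · -- no flush: same k
        have hk' : PySem.Int.floordiv (cnt + 1 - 1) 94 = k :=
          floordiv94_eq _ _ (by omega) (by omega)
        simp only [pvStepA, pvRawStep, hp, if_pos, hcap]
        refine ⟨rfl, Or.inr ⟨by simp; omega, ?_, ?_⟩⟩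
        · simp only [hk']; simp; omega
        · simp only [hk']; simpa using hout
    · -- run switch: A appends rc, B appends cnt to raw
      simp only [pvStepA, pvRawStep, hp, Bool.false_eq_true, if_false]
      have e1 : PySem.Int.floordiv ((1:Int) - 1) 94 = 0 := by
        rw [show ((1:Int) - 1) = 0 by norm_num]; exact e0
      refine ⟨rfl, Or.inr ⟨by simp, ?_, ?_⟩⟩
      · simp only [e1]
        omega
      · simp only [e1, Int.toNat_zero, List.replicate_zero, List.flatten_nil, List.append_nil]
        rw [hout, hrc]
        simp only [List.flatMap_append, List.flatMap_cons, List.flatMap_nil]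
        rw [expandOne_pos cnt (by omega), ← hk]
        simp

lemma pvInv_foldl (ps : List Int) (sA sB : Int × Int × List Int) (h : pvInv sA sB) :
    pvInv (ps.foldl pvStepA sA) (ps.foldl pvRawStep sB) := by
  induction ps generalizing sA sB with
  | nil => exact h
  | cons p t ih => exact ih _ _ (pvInv_step sA sB p h)

-- A's nested loop over the lines is the flat loop over all pixels
lemma foldl_lines (lines : List (List Int)) (f : (Int × Int × List Int) → Int → (Int × Int × List Int)) :
    ∀ s, lines.foldl (fun s vline => vline.foldl f s) s = (lines.flatMap id).foldl f s := by
  induction lines with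
  | nil => intro s; rfl
  | cons l t ih => intro s; simp [List.foldl_append, ih]

theorem generate_runs_af2_l_spec_core (bitmap : List (List Int)) (lineskip : Int) (w : Int) (h_ : Int) :
    generate_runs_af2_l bitmap lineskip w h_ = generate_runs_af2_l_alt bitmap lineskip w h_ := by
  unfold generate_runs_af2_l generate_runs_af2_l_alt
  simp only [foldl_lines]
  set ps := (pvReorder bitmap lineskip h_).flatMap id
  have hinv : pvInv (ps.foldl pvStepA (0, 0, [])) (ps.foldl pvRawStep (0, 0, [])) := by
    apply pvInv_foldl
    exact ⟨rfl, Or.inl ⟨rfl, rfl, rfl, rfl⟩⟩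
  set sA := ps.foldl pvStepA (0, 0, ([] : List Int))
  set sB := ps.foldl pvRawStep (0, 0, ([] : List Int))
  obtain ⟨-, hrest⟩ := hinv
  rcases hrest with ⟨h0, hrc, hraw, hout⟩ | ⟨h1, hrc, hout⟩
  · rw [expand_foldl]
    simp [h0, hrc, hraw, hout]
  · obtain ⟨hb1, hb2⟩ := floordiv94_bounds (sB.1 - 1) (by omega)
    have hApos : sA.1 > 0 := by omega
    have hBpos : sB.1 > 0 := by omega
    rw [if_pos hApos, if_pos hBpos, expand_foldl]
    simp only [List.nil_append, List.flatMap_append, List.flatMap_cons, List.flatMap_nil]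
    rw [expandOne_pos sB.1 (by omega), hout, hrc]
    simp

-- ===== VERDICT (by name: the statement is the Claim_ definition above) =====
theorem generate_runs_af2_l_spec : Claim_equal_generate_runs_af2_l := by
  intro bitmap lineskip w h_ _ _
  exact generate_runs_af2_l_spec_core bitmap lineskip w h_
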